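-- pv_equiv track=rewrite | github.com/mars12938/CS50-AI | 0-tictactoe/tictactoe.py | get_mask
-- ===== SOURCE A (Python) =====
-- def get_mask(number, board):
--     mask_int = 0
--
--     for i in range(len(board)):
--         if board[i] != number:
--             continue
--         n = len(board) - i - 1
--         x = 1 << n
--         mask_int |= x
--     return mask_int
-- ===== SOURCE B (Python) =====
-- def get_mask(number, board):
--     mask = 0
--     for cell in board:
--         mask = 2 * mask + (1 if cell == number else 0)
--     return mask
-- ===== Notes on version B (the rewrite author's own statement) =====
-- stated objective: simpler
-- what changed: Replaces the index loop that ORs independently computed bits 1 << (len(board)-i-1) with a Horner-style accumulator threaded left-to-right (mask = 2*mask + match), removing all index arithmetic and shift/or computation.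
import Mathlib
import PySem

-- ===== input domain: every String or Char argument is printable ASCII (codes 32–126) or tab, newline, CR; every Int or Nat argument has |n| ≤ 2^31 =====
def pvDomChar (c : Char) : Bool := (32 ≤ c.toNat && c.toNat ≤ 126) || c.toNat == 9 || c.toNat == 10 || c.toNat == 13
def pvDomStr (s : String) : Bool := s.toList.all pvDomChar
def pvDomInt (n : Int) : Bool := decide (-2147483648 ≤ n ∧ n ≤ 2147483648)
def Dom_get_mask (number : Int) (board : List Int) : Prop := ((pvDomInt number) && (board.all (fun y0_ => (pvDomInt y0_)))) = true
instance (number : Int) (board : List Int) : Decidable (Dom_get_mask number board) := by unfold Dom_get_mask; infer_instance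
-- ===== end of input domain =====

-- B replaces A's per-index shift/or bit assembly with a Horner-style accumulator
-- (mask = 2*mask + match) threaded left-to-right over the board (objective: simpler).

-- ===== PORT A =====
-- 'for i in range(len(board))' with board[i]; n = len(board)-i-1 is always ≥ 0 here,
-- so '1 << n' is ported as '1 <<< n.toNat' (exact: Python's << with a Nat shift amount).
def get_mask (number : Int) (board : List Int) : Int :=
  (PySem.List.pyRange 0 (board.length : Int) 1).foldl
    (fun mask_int i =>
      if PySem.List.pyGetD board i 0 ≠ number then mask_int
      else
        let n : Int := (board.length : Int) - i - 1
        let x : Int := (1 : Int) <<< n.toNat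
        PySem.Int.bor mask_int x) 0

-- ===== PORT B =====
def get_mask_alt (number : Int) (board : List Int) : Int :=
  board.foldl (fun mask cell => 2 * mask + (if cell = number then 1 else 0)) 0

-- ===== PRECONDITION & SPEC =====
def Spec_get_mask (number : Int) (board : List Int) (out : Int) : Prop := out = get_mask_alt number board
instance (number : Int) (board : List Int) (out : Int) : Decidable (Spec_get_mask number board out) := by unfold Spec_get_mask; infer_instance

-- ===== CLAIM (what is proved, stated in full; the proofs are below) =====
def Claim_equal_get_mask : Prop := ∀ (number : Int) (board : List Int), Dom_get_mask number board → Spec_get_mask number board (get_mask number board)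

-- ===== LEMMAS AND PROOFS =====

-- 2*m ||| 1 = 2*m + 1 on Nat (fresh low bit).
lemma two_mul_lor_one (m : Nat) : 2 * m ||| 1 = 2 * m + 1 := by
  have := Nat.lor_bit false m true 0
  simpa [Nat.bit] using this

lemma toNat_two_pow (j : Nat) : ((2 : Int) ^ j).toNat = 2 ^ j := by
  rw [show ((2 : Int) ^ j) = ((2 ^ j : Nat) : Int) from by push_cast; ring]
  exact Int.toNat_natCast _

-- OR-ing the fresh bit 2^k into an accumulator that is a multiple of 2^(k+1) is addition.
lemma bor_fresh_bit (m : Int) (k : Nat) (hm : 0 ≤ m) :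
    PySem.Int.bor (m * 2 ^ (k + 1)) ((1 : Int) <<< k) = (2 * m + 1) * 2 ^ k := by
  have hs : (1 : Int) <<< k = ((2 ^ k : Nat) : Int) := by simp [Int.shiftLeft_eq]
  have ha : (0 : Int) ≤ m * 2 ^ (k + 1) := by positivity
  rw [hs, PySem.Int.bor_of_nonneg ha (by positivity)]
  rw [Int.toNat_mul, toNat_two_pow, Int.toNat_natCast]
  have hn : m.toNat * 2 ^ (k + 1) ||| 2 ^ k = m.toNat * 2 ^ (k + 1) + 2 ^ k := by
    have e1 : m.toNat * 2 ^ (k + 1) = (2 * m.toNat) <<< k := by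
      simp [Nat.shiftLeft_eq]; ring
    have e2 : (2 : Nat) ^ k = 1 <<< k := by simp [Nat.shiftLeft_eq]
    rw [e1, e2, ← Nat.shiftLeft_or_distrib, two_mul_lor_one]
    simp [Nat.shiftLeft_eq]; ring
  rw [hn]
  push_cast [Int.toNat_of_nonneg hm]
  ring
  exact hm
  positivity

-- The main invariant: A's loop over the indices of the suffix t of the board (starting at
-- index pre.length), begun from an accumulator m * 2^t.length, computes B's Horner fold of t from m.
lemma loopA_eq (number : Int) :
    ∀ (t pre : List Int) (m : Int), 0 ≤ m →
      (PySem.List.pyRange (pre.length : Int) (((pre ++ t).length : Int)) 1).foldl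
        (fun mask_int i =>
          if PySem.List.pyGetD (pre ++ t) i 0 ≠ number then mask_int
          else
            let n : Int := ((pre ++ t).length : Int) - i - 1
            let x : Int := (1 : Int) <<< n.toNat
            PySem.Int.bor mask_int x) (m * 2 ^ t.length)
      = t.foldl (fun mask cell => 2 * mask + (if cell = number then 1 else 0)) m := by
  intro t
  induction t with
  | nil =>
    intro pre m _
    rw [PySem.List.pyRange_one_eq_nil (by simp)]
    simp
  | cons x xs ih =>
    intro pre m hm
    have hlen : ((pre ++ x :: xs).length : Int) = (pre.length : Int) + (xs.length : Int) + 1 := by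
      simp; ring
    have hget : PySem.List.pyGetD (pre ++ x :: xs) (pre.length : Int) 0 = x := by
      rw [PySem.List.pyGetD_natCast]
      simp [List.getD]
    have hexp : (((pre ++ x :: xs).length : Int) - (pre.length : Int) - 1).toNat = xs.length := by
      rw [hlen]; omega
    have hrest : pre ++ x :: xs = (pre ++ [x]) ++ xs := by simp
    have hnext : (pre.length : Int) + 1 = ((pre ++ [x]).length : Int) := by simp
    rw [PySem.List.pyRange_one_cons (by rw [hlen]; omega)]
    simp only [List.foldl_cons]
    rw [hget, hexp]
    by_cases hx : x = number
    · rw [if_neg (by simp [hx])]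
      simp only [List.length_cons]
      rw [bor_fresh_bit m xs.length hm]
      rw [hnext]
      conv_lhs => rw [hrest]
      rw [ih (pre ++ [x]) (2 * m + 1) (by omega)]
      simp [hx]
    · rw [if_pos hx]
      simp only [List.length_cons]
      rw [show m * (2 : Int) ^ (xs.length + 1) = (2 * m + 0) * 2 ^ xs.length from by
        rw [pow_succ]; ring]
      rw [hnext]
      conv_lhs => rw [hrest]
      rw [ih (pre ++ [x]) (2 * m + 0) (by omega)]
      simp [hx]

-- ===== VERDICT (by name: the statement is the Claim_ definition above) =====
theorem get_mask_spec : Claim_equal_get_mask := by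
  intro number board _
  unfold Spec_get_mask get_mask get_mask_alt
  have h := loopA_eq number board [] 0 (le_refl 0)
  simpa using h
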